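-- pv_equiv track=rewrite | github.com/chungwwei/advent_of_code | 2024/day_19/day_19.py | f
-- ===== SOURCE A (Python) =====
-- def f(towels, designs):
--     cache = {}
--     def dfs(design):
--         if design in cache: return cache[design]
--         if design == '': return True
--
--         res = False
--         for towel in towels:
--             if design.startswith(towel):
--                 res = res or dfs(design[len(towel):])
--         cache[design] = res
--         return res
--
--     cnt = 0
--     for design in designs:
--         if dfs(design):
--             cnt += 1
--
--     return cnt
-- ===== SOURCE B (Python) =====
-- def f(towels, designs):
--     lens = {len(t) for t in towels if t}
--     tset = set(towels)
--     cnt = 0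
--     for design in designs:
--         n = len(design)
--         dp = [False] * (n + 1)
--         dp[n] = True
--         for i in range(n - 1, -1, -1):
--             dp[i] = any(L <= n - i and dp[i + L] and design[i:i + L] in tset for L in lens)
--         cnt += dp[0]
--     return cnt
-- ===== Notes on version B (the rewrite author's own statement) =====
-- stated objective: faster
-- what changed: Replaces A's top-down memoized recursion that scans every towel at every position with a bottom-up boolean DP table per design that only tries the distinct towel lengths and checks the sliced substring against a hash set of towels.
-- outside the precondition, e.g. on f(['a', ''], ['a']): A returns 1, B returns 1
import Mathlib
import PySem

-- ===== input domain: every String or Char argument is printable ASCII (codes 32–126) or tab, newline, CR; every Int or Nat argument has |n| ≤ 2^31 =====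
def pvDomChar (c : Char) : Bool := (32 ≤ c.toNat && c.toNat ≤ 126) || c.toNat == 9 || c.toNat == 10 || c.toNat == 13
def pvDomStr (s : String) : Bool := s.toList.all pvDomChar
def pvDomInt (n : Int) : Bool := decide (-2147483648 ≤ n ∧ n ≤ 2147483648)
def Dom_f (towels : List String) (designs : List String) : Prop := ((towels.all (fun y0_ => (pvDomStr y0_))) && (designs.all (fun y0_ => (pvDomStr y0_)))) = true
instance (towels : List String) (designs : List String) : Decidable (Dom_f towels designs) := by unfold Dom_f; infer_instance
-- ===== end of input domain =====

-- B replaces A's memoized top-down recursion (which tries every towel at every position) by a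
-- per-design bottom-up boolean DP table that only tries the distinct towel lengths and looks the
-- sliced substring up in a set of towels; measurably faster with many towels.


-- ===== PORT A =====
-- A's dfs, on the design as a List Char.  A memoizes results in `cache`; memoization of a pure
-- function does not change any returned value, so the port is the same recursion without the cache.
-- The recursion is made structural with a fuel argument: under Pre_f every recursive call strictly
-- shortens the design (no empty towel), so fuel = length + 1 is never exhausted; the `0` branch is
-- unreachable on Pre_f inputs.  design.startswith(towel) is PySem.Chars.startswith;
-- design[len(towel):] with len(towel) ≥ 0 is List.drop (exact, PySem.List.slice_from_natCast).
def dfsA (towels : List String) : Nat → List Char → Bool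
  | 0, _ => false
  | Nat.succ fuel, design =>
    if design = [] then true
    else
      towels.foldl
        (fun res t =>
          res ||
            (if PySem.Chars.startswith design t.toList then
              dfsA towels fuel (design.drop t.toList.length)
            else false))
        false

def f (towels : List String) (designs : List String) : Int :=
  designs.foldl
    (fun cnt design =>
      if dfsA towels (design.toList.length + 1) design.toList then cnt + 1 else cnt)
    0

-- ===== PORT B =====
-- lens = {len(t) for t in towels if t}  (a set of the distinct lengths of the nonempty towels)
def lensOf (towels : List String) : PySem.Set Nat :=
  PySem.Set.ofList ((towels.filter (fun t => !t.toList.isEmpty)).map (fun t => t.toList.length))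

-- B's backwards loop 'for i in range(n-1, -1, -1): dp[i] = any(...)' builds the dp table from the
-- end of the design; ported as a recursion producing the dp list back-to-front: the list returned
-- for a suffix starting at position i is dp[i], dp[i+1], …, dp[n], so dp[i+L] is entry L-1 of the
-- tail (L ≥ 1 for every L in lens).  design[i:i+L] is List.take L of the suffix (exact,
-- PySem.List.slice_natCast_add); 'in tset' is PySem.Set.contains.
def buildDp (lens : PySem.Set Nat) (tset : PySem.Set String) : List Char → List Bool
  | [] => [true]
  | c :: rest =>
    let tail := buildDp lens tset rest
    (lens.any (fun L =>
        decide (L ≤ rest.length + 1) && tail.getD (L - 1) false &&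
          tset.contains (String.ofList ((c :: rest).take L)))) :: tail

def f_alt (towels : List String) (designs : List String) : Int :=
  let lens := lensOf towels
  let tset : PySem.Set String := PySem.Set.ofList towels
  designs.foldl
    (fun cnt design =>
      let dp := buildDp lens tset design.toList
      cnt + (if dp.headD false then 1 else 0))   -- cnt += dp[0]
    0

-- ===== PRECONDITION & SPEC =====
-- Pre_f excludes inputs where the towel list contains the empty string and some design is nonempty:
-- there A's dfs recurses on the unchanged design and overflows the stack (RecursionError) whenever
-- the empty towel is tried while no earlier towel has already succeeded; on those inputs of this
-- kind where A happens to return (an earlier match short-circuits the `or`), it returns the same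
-- count as B (see the cite in claim.json), but whether A returns at all is not a closed-form
-- condition on the input.
def Pre_f (towels : List String) (designs : List String) : Prop :=
  "" ∈ towels → ∀ d ∈ designs, d = ""
instance (towels : List String) (designs : List String) : Decidable (Pre_f towels designs) := by
  unfold Pre_f; infer_instance

def pvWitness_f : List String × List String := (["r", "wr", "b", "g", "bwu"], ["brwrr", "bggr", "ubwu"])

def Spec_f (towels : List String) (designs : List String) (out : Int) : Prop := out = f_alt towels designs
instance (towels : List String) (designs : List String) (out : Int) : Decidable (Spec_f towels designs out) := by unfold Spec_f; infer_instance

-- ===== CLAIM (what is proved, stated in full; the proofs are below) =====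
def Claim_equal_f : Prop := ∀ (towels : List String) (designs : List String), Dom_f towels designs → Pre_f towels designs → Spec_f towels designs (f towels designs)

-- ===== LEMMAS AND PROOFS =====

theorem pvWitness_f_ok : Dom_f pvWitness_f.1 pvWitness_f.2 ∧ Pre_f pvWitness_f.1 pvWitness_f.2 := by
  constructor
  · decide
  · intro h; exact absurd h (by decide)

-- a fold of `r || g t` is `any g`
theorem foldl_or_any {α : Type} (l : List α) (g : α → Bool) (b : Bool) :
    l.foldl (fun r t => r || g t) b = (b || l.any g) := by
  induction l generalizing b with
  | nil => simp
  | cons x xs ih => simp [List.foldl, ih, Bool.or_assoc]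

theorem buildDp_getD (lens : PySem.Set Nat) (tset : PySem.Set String) :
    ∀ (s : List Char) (j : Nat), j ≤ s.length →
      (buildDp lens tset s).getD j false = (buildDp lens tset (s.drop j)).headD false := by
  intro s
  induction s with
  | nil =>
    intro j hj
    have : j = 0 := by simpa using hj
    subst this; rfl
  | cons c rest ih =>
    intro j hj
    cases j with
    | zero => rfl
    | succ j' =>
      have hj' : j' ≤ rest.length := by simpa using hj
      simp only [buildDp, List.getD_cons_succ, List.drop_succ_cons]
      exact ih j' hj'

-- membership in lens = there is a nonempty towel of that length
theorem mem_lensOf (towels : List String) (L : Nat) :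
    L ∈ lensOf towels ↔ ∃ t ∈ towels, t.toList ≠ [] ∧ t.toList.length = L := by
  unfold lensOf
  rw [PySem.Set.mem_ofList]
  simp [List.mem_map, List.mem_filter]
  tauto

-- the heart of the equivalence: with no empty towel, A's dfs (with enough fuel) computes the head
-- of B's dp list for the same suffix.
theorem dfs_eq_buildDp (towels : List String) (hne : "" ∉ towels) :
    ∀ (n : Nat) (s : List Char), s.length ≤ n → ∀ fuel, s.length < fuel →
      dfsA towels fuel s =
        (buildDp (lensOf towels) (PySem.Set.ofList towels) s).headD false := by
  intro n
  induction n with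
  | zero =>
    intro s hs fuel hf
    have : s = [] := List.length_eq_zero_iff.mp (Nat.le_zero.mp hs)
    subst this
    cases fuel with
    | zero => omega
    | succ k => simp [dfsA, buildDp]
  | succ n ih =>
    intro s hs fuel hf
    cases fuel with
    | zero => omega
    | succ k =>
      cases s with
      | nil => simp [dfsA, buildDp]
      | cons c rest =>
        have hslen : (c :: rest).length = rest.length + 1 := by simp
        -- a recursive dfs call on the suffix dropped by L ≥ 1 equals the dp entry L - 1 of the tail
        have hrec : ∀ L : Nat, 1 ≤ L → L ≤ rest.length + 1 →
            dfsA towels k ((c :: rest).drop L) =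
              (buildDp (lensOf towels) (PySem.Set.ofList towels) rest).getD (L - 1) false := by
          intro L hL1 hLle
          have hdrop : (c :: rest).drop L = rest.drop (L - 1) := by
            cases L with
            | zero => omega
            | succ L' => simp
          rw [buildDp_getD (lensOf towels) (PySem.Set.ofList towels) rest (L - 1) (by omega), ← hdrop]
          apply ih
          · simp only [List.length_drop, hslen]; omega
          · simp only [List.length_drop, hslen]; omega
        -- A side: the foldl of `res or …` over towels is an `any`
        have hA : dfsA towels (k + 1) (c :: rest) =
            towels.any (fun t =>
              if PySem.Chars.startswith (c :: rest) t.toList then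
                dfsA towels k ((c :: rest).drop t.toList.length)
              else false) := by
          simp only [dfsA, if_neg (by simp : ¬(c :: rest = ([] : List Char)))]
          exact foldl_or_any _ _ _
    -- B side: head of the freshly consed dp list
        have hBhead : (buildDp (lensOf towels) (PySem.Set.ofList towels) (c :: rest)).headD false =
            (lensOf towels).any (fun L =>
              decide (L ≤ rest.length + 1) &&
                (buildDp (lensOf towels) (PySem.Set.ofList towels) rest).getD (L - 1) false &&
                (PySem.Set.ofList towels).contains (String.ofList ((c :: rest).take L))) := rfl
        rw [hA, hBhead, Bool.eq_iff_iff, List.any_eq_true, List.any_eq_true]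
        constructor
        · -- a towel matches ⇒ its length witnesses B's any
          rintro ⟨t, htmem, hgt⟩
          by_cases hpre : PySem.Chars.startswith (c :: rest) t.toList = true
          case neg => rw [if_neg hpre] at hgt; exact absurd hgt (by simp)
          rw [if_pos hpre] at hgt
          have htne : t.toList ≠ [] := by
            intro hnil
            apply hne
            have : t = "" := by
              have := congrArg String.ofList hnil
              rwa [String.ofList_toList] at this
            rwa [this] at htmem
          have hL1 : 1 ≤ t.toList.length := List.length_pos_iff.mpr htne
          have hprefix : t.toList <+: (c :: rest) := (PySem.Chars.startswith_iff _ _).mp hpre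
          have hLle : t.toList.length ≤ rest.length + 1 := by
            have := hprefix.length_le
            simpa [hslen] using this
          have htake : (c :: rest).take t.toList.length = t.toList :=
            (List.prefix_iff_eq_take.mp hprefix).symm
          refine ⟨t.toList.length, (mem_lensOf towels _).mpr ⟨t, htmem, htne, rfl⟩, ?_⟩
          rw [← hrec t.toList.length hL1 hLle]
          simp only [Bool.and_eq_true, decide_eq_true_eq]
          refine ⟨⟨hLle, hgt⟩, ?_⟩
          rw [htake, String.ofList_toList]
          exact List.contains_iff_mem.mpr ((PySem.Set.mem_ofList towels t).mpr htmem)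
        · -- a length L fires in B ⇒ the towel `design[i:i+L]` matches in A
          rintro ⟨L, hLmem, hLp⟩
          simp only [Bool.and_eq_true, decide_eq_true_eq] at hLp
          obtain ⟨⟨hLle, hdp⟩, hcont⟩ := hLp
          obtain ⟨t0, _, ht0ne, ht0len⟩ := (mem_lensOf towels L).mp hLmem
          have hL1 : 1 ≤ L := ht0len ▸ List.length_pos_iff.mpr ht0ne
          set t : String := String.ofList ((c :: rest).take L) with ht
          have htl : t.toList = (c :: rest).take L := String.toList_ofList
          have htmem : t ∈ towels :=
            (PySem.Set.mem_ofList towels t).mp (List.contains_iff_mem.mp hcont)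
          have htlen : t.toList.length = L := by
            rw [htl, List.length_take]
            simp only [hslen] at *
            omega
          refine ⟨t, htmem, ?_⟩
          have hpre : PySem.Chars.startswith (c :: rest) t.toList = true := by
            rw [PySem.Chars.startswith_iff, htl]
            exact List.take_prefix _ _
          rw [if_pos hpre, htlen, hrec L hL1 hLle]
          exact hdp

-- per-design step equality under Pre_f
theorem step_eq (towels : List String) (designs : List String)
    (hpre : Pre_f towels designs) (cnt : Int) (d : String) (hd : d ∈ designs) :
    (if dfsA towels (d.toList.length + 1) d.toList then cnt + 1 else cnt) =
      cnt + (if (buildDp (lensOf towels) (PySem.Set.ofList towels) d.toList).headD false then 1 else 0) := by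
  by_cases hE : "" ∈ towels
  · have hd0 : d = "" := hpre hE d hd
    subst hd0
    norm_num [dfsA, buildDp]
  · have h := dfs_eq_buildDp towels hE d.toList.length d.toList le_rfl (d.toList.length + 1) (by omega)
    rw [h]
    by_cases hb : (buildDp (lensOf towels) (PySem.Set.ofList towels) d.toList).headD false = true
    · rw [if_pos hb, if_pos hb]
    · rw [if_neg hb, if_neg hb]; omega

-- ===== VERDICT (by name: the statement is the Claim_ definition above) =====
theorem f_spec : Claim_equal_f := by
  intro towels designs _ hpre
  unfold Spec_f f f_alt
  exact PySem.List.foldl_congr_mem designs _ _ 0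
    (fun cnt d hd => step_eq towels designs hpre cnt d hd)
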